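-- pv_equiv track=rewrite | github.com/anjalii-28/testing | call_intelligence/api.py | _priority_rank
-- ===== SOURCE A (Python) =====
-- def _priority_rank(value: str | None) -> int:
--     """Higher rank means higher urgency."""
--     v = str(value or "").strip().lower()
--     if any(x in v for x in ("urgent", "critical", "emergency")):
--         return 3
--     if "high" in v:
--         return 3
--     if "medium" in v:
--         return 2
--     if "low" in v:
--         return 1
--     return 0
-- ===== SOURCE B (Python) =====
-- def _priority_rank(value):
--     """Higher rank means higher urgency."""
--     v = str(value or "").strip().lower()
--     best = 0
--     for i in range(len(v)):
--         if v.startswith(("urgent", "critical", "emergency", "high"), i):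
--             here = 3
--         elif v.startswith("medium", i):
--             here = 2
--         elif v.startswith("low", i):
--             here = 1
--         else:
--             here = 0
--         if here > best:
--             best = here
--     return best
-- ===== Notes on version B (the rewrite author's own statement) =====
-- stated objective: alternative
-- what changed: Replaces A's ladder of per-keyword substring-containment tests with a single loop over the string's positions that rates each position by the keyword starting there (startswith at index i) and keeps the maximum rank; no substring search is performed.
import Mathlib
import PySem

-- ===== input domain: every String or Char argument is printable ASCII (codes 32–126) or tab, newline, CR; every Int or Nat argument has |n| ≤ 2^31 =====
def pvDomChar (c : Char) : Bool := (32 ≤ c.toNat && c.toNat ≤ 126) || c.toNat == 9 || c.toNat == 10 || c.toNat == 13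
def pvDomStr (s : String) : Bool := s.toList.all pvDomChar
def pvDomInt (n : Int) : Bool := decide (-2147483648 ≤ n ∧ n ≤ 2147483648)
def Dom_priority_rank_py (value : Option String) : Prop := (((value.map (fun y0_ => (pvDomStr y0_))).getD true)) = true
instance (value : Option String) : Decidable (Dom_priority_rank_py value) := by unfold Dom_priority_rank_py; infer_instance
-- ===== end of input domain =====

-- B replaces A's per-keyword substring-containment ladder by one loop over the string's
-- positions, rating each position by the keyword that starts there and keeping the maximum
-- (objective: alternative).

-- ===== PORT A =====
def priority_rank_py (value : Option String) : Int :=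
  let v := PySem.Str.lower (PySem.Str.strip (value.getD ""))
  if ["urgent", "critical", "emergency"].any (fun x => PySem.Str.isIn x v) then 3
  else if PySem.Str.isIn "high" v then 3
  else if PySem.Str.isIn "medium" v then 2
  else if PySem.Str.isIn "low" v then 1
  else 0

-- ===== PORT B =====
-- rank of the keyword starting at position i of v (the v.startswith(…, i) ladder of Source B,
-- exact for 0 ≤ i: v.startswith(kw, i) is 'kw is a prefix of v[i:]')
def prHere (v : List Char) : Int :=
  if PySem.Chars.startswith v "urgent".toList || PySem.Chars.startswith v "critical".toList
      || PySem.Chars.startswith v "emergency".toList || PySem.Chars.startswith v "high".toList then 3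
  else if PySem.Chars.startswith v "medium".toList then 2
  else if PySem.Chars.startswith v "low".toList then 1
  else 0

def priority_rank_py_alt (value : Option String) : Int :=
  let v := PySem.Str.lower (PySem.Str.strip (value.getD ""))
  (PySem.List.pyRange 0 (PySem.Str.len v) 1).foldl
    (fun best i =>
      let here := prHere (v.toList.drop i.toNat)
      if here > best then here else best) 0

-- ===== PRECONDITION & SPEC =====
def Spec_priority_rank_py (value : Option String) (out : Int) : Prop := out = priority_rank_py_alt value
instance (value : Option String) (out : Int) : Decidable (Spec_priority_rank_py value out) := by unfold Spec_priority_rank_py; infer_instance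

-- ===== CLAIM (what is proved, stated in full; the proofs are below) =====
def Claim_equal_priority_rank_py : Prop := ∀ (value : Option String), Dom_priority_rank_py value → Spec_priority_rank_py value (priority_rank_py value)

-- ===== LEMMAS AND PROOFS =====

theorem prHere_le_three (v : List Char) : prHere v ≤ 3 := by
  unfold prHere; split_ifs <;> norm_num

theorem prFold_acc_le (l : List Char) (idxs : List Int) (acc : Int) :
    acc ≤ idxs.foldl
      (fun best i => let here := prHere (l.drop i.toNat); if here > best then here else best) acc := by
  induction idxs generalizing acc with
  | nil => simp
  | cons i t ih =>
    simp only [List.foldl]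
    refine le_trans ?_ (ih _)
    split_ifs with h
    · exact le_of_lt h
    · exact le_refl _

theorem prFold_mem_le (l : List Char) (idxs : List Int) (acc : Int) (i : Int) (hi : i ∈ idxs) :
    prHere (l.drop i.toNat) ≤ idxs.foldl
      (fun best j => let here := prHere (l.drop j.toNat); if here > best then here else best) acc := by
  induction idxs generalizing acc with
  | nil => simp at hi
  | cons j t ih =>
    simp only [List.foldl]
    rcases List.mem_cons.1 hi with rfl | hmem
    · refine le_trans ?_ (prFold_acc_le l t _)
      split_ifs with h
      · exact le_refl _
      · exact le_of_not_gt h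
    · exact ih _ hmem

theorem prFold_le (l : List Char) (idxs : List Int) (acc b : Int)
    (hacc : acc ≤ b) (h : ∀ i ∈ idxs, prHere (l.drop i.toNat) ≤ b) :
    idxs.foldl
      (fun best i => let here := prHere (l.drop i.toNat); if here > best then here else best) acc ≤ b := by
  induction idxs generalizing acc with
  | nil => simpa
  | cons i t ih =>
    simp only [List.foldl]
    refine ih _ ?_ (fun j hj => h j (List.mem_cons_of_mem _ hj))
    split_ifs with hgt
    · exact h i (List.mem_cons_self ..)
    · exact hacc

theorem isIn_to_drop_prefix (sub s : List Char) (h : PySem.Chars.isIn sub s = true) :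
    ∃ j, j < s.length + 1 ∧ sub <+: s.drop j := by
  obtain ⟨j, hj⟩ := (PySem.Chars.exists_prefix_drop_iff_isIn sub s).2 h
  by_cases hle : j ≤ s.length
  · exact ⟨j, by omega, hj⟩
  · refine ⟨s.length, by omega, ?_⟩
    rw [List.drop_eq_nil_of_le (le_of_not_ge hle)] at hj
    simpa [List.drop_length] using hj

theorem drop_prefix_to_isIn (sub s : List Char) (j : ℕ) (h : sub <+: s.drop j) :
    PySem.Chars.isIn sub s = true :=
  (PySem.Chars.exists_prefix_drop_iff_isIn sub s).1 ⟨j, h⟩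

theorem prHere_eq_three_of_pre (v : List Char)
    (h : "urgent".toList <+: v ∨ "critical".toList <+: v ∨ "emergency".toList <+: v ∨ "high".toList <+: v) :
    prHere v = 3 := by
  have hb : (PySem.Chars.startswith v "urgent".toList || PySem.Chars.startswith v "critical".toList
      || PySem.Chars.startswith v "emergency".toList || PySem.Chars.startswith v "high".toList) = true := by
    rcases h with h | h | h | h <;>
      simp only [(PySem.Chars.startswith_iff _ _).2 h, Bool.true_or, Bool.or_true]
  unfold prHere
  simp only [hb, if_true]

-- at a nonempty-keyword match position j, j is a valid loop index and contributes its rank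
theorem rank_le_fold (s : String) (j : ℕ) (hjlt : j < s.toList.length) (r : Int)
    (hr : prHere (s.toList.drop j) = r) :
    r ≤ (PySem.List.pyRange 0 (PySem.Str.len s) 1).foldl
      (fun best i => let here := prHere (s.toList.drop i.toNat); if here > best then here else best) 0 := by
  have hmem : (j : Int) ∈ PySem.List.pyRange 0 (PySem.Str.len s) 1 := by
    rw [PySem.List.mem_pyRange_one]
    constructor
    · exact_mod_cast Nat.zero_le j
    · have : PySem.Str.len s = (s.toList.length : Int) := by simp
      rw [this]; exact_mod_cast hjlt
  have := prFold_mem_le s.toList _ 0 (j : Int) hmem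
  rwa [Int.toNat_natCast, hr] at this

theorem match_pos_lt (sub : List Char) (l : List Char) (j : ℕ) (hsub : sub ≠ [])
    (_hj : j < l.length + 1) (hp : sub <+: l.drop j) : j < l.length := by
  rcases Nat.lt_or_ge j l.length with h' | h'
  · exact h'
  · exfalso
    rw [List.drop_eq_nil_of_le h'] at hp
    exact hsub (List.prefix_nil.mp hp)

-- A's if-ladder over s equals B's position-max loop over s
theorem ladder_eq_scan (s : String) :
    (if ["urgent", "critical", "emergency"].any (fun x => PySem.Str.isIn x s) then (3 : Int)
     else if PySem.Str.isIn "high" s then 3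
     else if PySem.Str.isIn "medium" s then 2
     else if PySem.Str.isIn "low" s then 1
     else 0) =
    (PySem.List.pyRange 0 (PySem.Str.len s) 1).foldl
      (fun best i => let here := prHere (s.toList.drop i.toNat); if here > best then here else best) 0 := by
  have hstr : ∀ sub : String, PySem.Str.isIn sub s = PySem.Chars.isIn sub.toList s.toList :=
    fun _ => rfl
  have hub : (PySem.List.pyRange 0 (PySem.Str.len s) 1).foldl
      (fun best i => let here := prHere (s.toList.drop i.toNat); if here > best then here else best) 0 ≤ 3 :=
    prFold_le _ _ 0 3 (by norm_num) (fun i _ => prHere_le_three _)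
  split_ifs with h1 h2 h3 h4
  · -- some of urgent/critical/emergency is a substring → both are 3
    simp only [List.any_cons, List.any_nil, Bool.or_false, Bool.or_eq_true, hstr] at h1
    have h3le : (3 : Int) ≤ (PySem.List.pyRange 0 (PySem.Str.len s) 1).foldl
        (fun best i => let here := prHere (s.toList.drop i.toNat); if here > best then here else best) 0 := by
      rcases h1 with h | h | h <;>
        · obtain ⟨j, hj, hp⟩ := isIn_to_drop_prefix _ _ h
          exact rank_le_fold s j (match_pos_lt _ _ j (by decide) hj hp) 3
            (prHere_eq_three_of_pre _ (by tauto))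
    omega
  · -- "high" is a substring → both are 3
    rw [hstr] at h2
    obtain ⟨j, hj, hp⟩ := isIn_to_drop_prefix _ _ h2
    have h3le := rank_le_fold s j (match_pos_lt _ _ j (by decide) hj hp) 3
      (prHere_eq_three_of_pre _ (Or.inr (Or.inr (Or.inr hp))))
    omega
  all_goals
    simp only [List.any_cons, List.any_nil, Bool.or_false, Bool.or_eq_true, hstr, not_or] at h1
    obtain ⟨hu, hc, he⟩ := h1
    rw [hstr] at h2
    have hnpre : ∀ j, ¬ ("urgent".toList <+: s.toList.drop j) ∧ ¬ ("critical".toList <+: s.toList.drop j)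
        ∧ ¬ ("emergency".toList <+: s.toList.drop j) ∧ ¬ ("high".toList <+: s.toList.drop j) := by
      intro j
      exact ⟨fun h => hu (drop_prefix_to_isIn _ _ j h), fun h => hc (drop_prefix_to_isIn _ _ j h),
        fun h => he (drop_prefix_to_isIn _ _ j h), fun h => h2 (drop_prefix_to_isIn _ _ j h)⟩
    have hHere2 : ∀ j, prHere (s.toList.drop j) ≤ 2 := by
      intro j
      obtain ⟨hp1, hp2, hp3, hp4⟩ := hnpre j
      unfold prHere
      split_ifs with hb1 <;> try norm_num
      rcases Bool.or_eq_true_iff.1 hb1 with hb2 | hb2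
      · rcases Bool.or_eq_true_iff.1 hb2 with hb5 | hb5
        · rcases Bool.or_eq_true_iff.1 hb5 with hb6 | hb6
          · exact absurd ((PySem.Chars.startswith_iff _ _).1 hb6) hp1
          · exact absurd ((PySem.Chars.startswith_iff _ _).1 hb6) hp2
        · exact absurd ((PySem.Chars.startswith_iff _ _).1 hb5) hp3
      · exact absurd ((PySem.Chars.startswith_iff _ _).1 hb2) hp4
  · -- "medium" is a substring, no 3-keyword → both are 2
    rw [hstr] at h3
    obtain ⟨j, hj, hp⟩ := isIn_to_drop_prefix _ _ h3
    have hHj : prHere (s.toList.drop j) = 2 := by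
      obtain ⟨hp1, hp2, hp3, hp4⟩ := hnpre j
      unfold prHere
      have hsw : PySem.Chars.startswith (s.toList.drop j) "medium".toList = true :=
        (PySem.Chars.startswith_iff _ _).2 hp
      have hb0 : (PySem.Chars.startswith (s.toList.drop j) "urgent".toList
          || PySem.Chars.startswith (s.toList.drop j) "critical".toList
          || PySem.Chars.startswith (s.toList.drop j) "emergency".toList
          || PySem.Chars.startswith (s.toList.drop j) "high".toList) = false := by
        simp only [Bool.or_eq_false_iff]
        refine ⟨⟨⟨?_, ?_⟩, ?_⟩, ?_⟩ <;>
          · rw [Bool.eq_false_iff]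
            intro hx
            first
              | exact hp1 ((PySem.Chars.startswith_iff _ _).1 hx)
              | exact hp2 ((PySem.Chars.startswith_iff _ _).1 hx)
              | exact hp3 ((PySem.Chars.startswith_iff _ _).1 hx)
              | exact hp4 ((PySem.Chars.startswith_iff _ _).1 hx)
      simp only [hb0, hsw, Bool.false_eq_true, if_false, if_true]
    have hle := rank_le_fold s j (match_pos_lt _ _ j (by decide) hj hp) 2 hHj
    have hub2 := prFold_le s.toList (PySem.List.pyRange 0 (PySem.Str.len s) 1) 0 2
      (by norm_num) (fun i _ => hHere2 i.toNat)
    omega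
  all_goals
    rw [hstr] at h3
    have hnm : ∀ j, ¬ ("medium".toList <+: s.toList.drop j) :=
      fun j h => h3 (drop_prefix_to_isIn _ _ j h)
    have hHere1 : ∀ j, prHere (s.toList.drop j) ≤ 1 := by
      intro j
      have h2' := hHere2 j
      unfold prHere at h2' ⊢
      split_ifs at h2' ⊢ with hb1 hb2 <;> try norm_num
      · omega
      · exact absurd ((PySem.Chars.startswith_iff _ _).1 hb2) (hnm j)
  · -- "low" is a substring, nothing higher → both are 1
    rw [hstr] at h4
    obtain ⟨j, hj, hp⟩ := isIn_to_drop_prefix _ _ h4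
    have hHj : prHere (s.toList.drop j) = 1 := by
      have h1' := hHere1 j
      unfold prHere at h1' ⊢
      have hsw : PySem.Chars.startswith (s.toList.drop j) "low".toList = true :=
        (PySem.Chars.startswith_iff _ _).2 hp
      split_ifs at h1' ⊢ with hb1 hb2 <;> first | rfl | omega
    have hle := rank_le_fold s j (match_pos_lt _ _ j (by decide) hj hp) 1 hHj
    have hub1 := prFold_le s.toList (PySem.List.pyRange 0 (PySem.Str.len s) 1) 0 1
      (by norm_num) (fun i _ => hHere1 i.toNat)
    omega
  · -- no keyword anywhere → both are 0
    rw [hstr] at h4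
    have hnl : ∀ j, ¬ ("low".toList <+: s.toList.drop j) :=
      fun j h => h4 (drop_prefix_to_isIn _ _ j h)
    have hHere0 : ∀ j, prHere (s.toList.drop j) ≤ 0 := by
      intro j
      have h1' := hHere1 j
      unfold prHere at h1' ⊢
      split_ifs at h1' ⊢ with hb1 hb2 hb3
      · omega
      · omega
      · exact absurd ((PySem.Chars.startswith_iff _ _).1 hb3) (hnl j)
      · norm_num
    have hub0 := prFold_le s.toList (PySem.List.pyRange 0 (PySem.Str.len s) 1) 0 0
      (le_refl _) (fun i _ => hHere0 i.toNat)
    have hlb := prFold_acc_le s.toList (PySem.List.pyRange 0 (PySem.Str.len s) 1) 0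
    omega

-- ===== VERDICT (by name: the statement is the Claim_ definition above) =====
theorem priority_rank_py_spec : Claim_equal_priority_rank_py := by
  intro value _
  unfold Spec_priority_rank_py priority_rank_py priority_rank_py_alt
  exact ladder_eq_scan _
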